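-- pv_equiv track=rewrite | github.com/jacob-corletto/Stock-algo | main.py | knapsack_best_subset
-- ===== SOURCE A (Python) =====
-- def knapsack_best_subset(sublists, capacity):
--   """Returns the best subset of sublists that maximizes the sum of the second values, subject to the given capacity.
--
--   Args:
--     sublists: A list of sublists, where each sublist is a list of two elements: the profit and weight of the sublist.
--     capacity: The maximum capacity of the knapsack.
--
--   Returns:
--     The best subset of sublists that maximizes the sum of the second values, subject to the given capacity.
--   """
--
--   # Sort the sublists in decreasing order of their second values.
--   sublists.sort(key=lambda sublist: sublist[1], reverse=True)
--
--   # Initialize the final solution.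
--   final_solution = []
--   total_weight = 0
--
--   # Add sublists to the final solution until the capacity is exceeded.
--   for sublist in sublists:
--     if total_weight + sublist[1] <= capacity:
--       final_solution.append(sublist)
--       total_weight += sublist[1]
--     else:
--       break
--
--   # Return the final solution.
--   return final_solution
-- ===== SOURCE B (Python) =====
-- def knapsack_best_subset(sublists, capacity):
--     # Same in-place sort as A (mutates the argument identically).
--     sublists.sort(key=lambda s: s[1], reverse=True)
--     # Prefix sums of the weights.
--     cums = []
--     total = 0
--     for s in sublists:
--         total += s[1]
--         cums.append(total)
--     # Length of the longest prefix whose cumulative weight fits.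
--     n = 0
--     while n < len(cums) and cums[n] <= capacity:
--         n += 1
--     return sublists[:n]
-- ===== Notes on version B (the rewrite author's own statement) =====
-- stated objective: alternative
-- what changed: A's single accumulate-and-break loop is replaced by a prefix-sum table plus a separate prefix-length scan and a slice; the in-place sort is kept identical.
-- outside the precondition, e.g. on knapsack_best_subset([[1], [2, 3]], 10): A raises IndexError, B raises IndexError
import Mathlib
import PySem

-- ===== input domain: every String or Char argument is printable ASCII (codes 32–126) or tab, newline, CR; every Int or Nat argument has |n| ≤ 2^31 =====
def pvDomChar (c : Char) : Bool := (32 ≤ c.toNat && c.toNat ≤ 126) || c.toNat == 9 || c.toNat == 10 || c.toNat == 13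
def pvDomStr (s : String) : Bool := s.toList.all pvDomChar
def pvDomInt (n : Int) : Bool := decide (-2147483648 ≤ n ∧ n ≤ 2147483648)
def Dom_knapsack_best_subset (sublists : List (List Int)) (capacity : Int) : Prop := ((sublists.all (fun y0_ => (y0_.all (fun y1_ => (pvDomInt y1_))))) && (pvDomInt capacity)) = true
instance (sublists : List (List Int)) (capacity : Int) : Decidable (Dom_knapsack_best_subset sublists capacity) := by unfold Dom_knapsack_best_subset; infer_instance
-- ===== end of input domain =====

-- B replaces A's accumulate-and-break loop by a prefix-sum table, a prefix-length scan and a slice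
-- (objective: alternative, same cost). Both A and B sort `sublists` in place identically; the
-- equivalence proved here is about the RETURN value.

-- ===== PORT A =====
-- A's for-loop with break: recursion over the sorted list carrying the running total_weight.
def pvLoopA (capacity : Int) : List (List Int) → Int → List (List Int)
  | [], _ => []
  | s :: rest, tw =>
      if tw + PySem.List.pyGetD s 1 0 ≤ capacity then
        s :: pvLoopA capacity rest (tw + PySem.List.pyGetD s 1 0)
      else []

def knapsack_best_subset (sublists : List (List Int)) (capacity : Int) : List (List Int) :=
  let ss := PySem.List.sorted sublists (fun s => PySem.List.pyGetD s 1 0) true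
  pvLoopA capacity ss 0

-- ===== PORT B =====
-- prefix sums of the weights (Source B's accumulation loop)
def pvCums : Int → List Int → List Int
  | _, [] => []
  | t, w :: ws => (t + w) :: pvCums (t + w) ws

-- Source B's while loop: length of the longest prefix of cums that is ≤ capacity
def pvPrefixLen (capacity : Int) : List Int → Nat
  | [] => 0
  | c :: cs => if c ≤ capacity then pvPrefixLen capacity cs + 1 else 0

def knapsack_best_subset_alt (sublists : List (List Int)) (capacity : Int) : List (List Int) :=
  let ss := PySem.List.sorted sublists (fun s => PySem.List.pyGetD s 1 0) true
  let cums := pvCums 0 (ss.map (fun s => PySem.List.pyGetD s 1 0))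
  ss.take (pvPrefixLen capacity cums)

-- ===== PRECONDITION & SPEC =====
-- Pre_ excludes inputs where some sublist has fewer than 2 elements: there `sublist[1]` raises
-- IndexError in both Pythons.
def Pre_knapsack_best_subset (sublists : List (List Int)) (capacity : Int) : Prop :=
  ∀ s ∈ sublists, 2 ≤ s.length
instance (sublists : List (List Int)) (capacity : Int) : Decidable (Pre_knapsack_best_subset sublists capacity) := by unfold Pre_knapsack_best_subset; infer_instance

def pvWitness_knapsack_best_subset : List (List Int) × Int := ([[5, 2], [3, 1], [4, 3]], 4)

def Spec_knapsack_best_subset (sublists : List (List Int)) (capacity : Int) (out : List (List Int)) : Prop := out = knapsack_best_subset_alt sublists capacity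
instance (sublists : List (List Int)) (capacity : Int) (out : List (List Int)) : Decidable (Spec_knapsack_best_subset sublists capacity out) := by unfold Spec_knapsack_best_subset; infer_instance

-- ===== CLAIM (what is proved, stated in full; the proofs are below) =====
def Claim_equal_knapsack_best_subset : Prop := ∀ (sublists : List (List Int)) (capacity : Int), Dom_knapsack_best_subset sublists capacity → Pre_knapsack_best_subset sublists capacity → Spec_knapsack_best_subset sublists capacity (knapsack_best_subset sublists capacity)

-- ===== LEMMAS AND PROOFS =====
-- The break-loop over any list with running total t equals: take the prefix whose cumulative
-- weights (started at t) stay ≤ capacity.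
theorem pvLoopA_eq_take (capacity : Int) (ss : List (List Int)) (t : Int) :
    pvLoopA capacity ss t
      = ss.take (pvPrefixLen capacity (pvCums t (ss.map (fun s => PySem.List.pyGetD s 1 0)))) := by
  induction ss generalizing t with
  | nil => simp [pvLoopA]
  | cons s rest ih =>
      simp only [pvLoopA, List.map_cons, pvCums, pvPrefixLen]
      by_cases h : t + PySem.List.pyGetD s 1 0 ≤ capacity
      · simp [h, ih]
      · simp [h]

-- ===== VERDICT (by name: the statement is the Claim_ definition above) =====
theorem knapsack_best_subset_spec : Claim_equal_knapsack_best_subset := by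
  intro sublists capacity _ _
  unfold Spec_knapsack_best_subset knapsack_best_subset knapsack_best_subset_alt
  exact pvLoopA_eq_take capacity _ 0
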